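-- pv_equiv track=rewrite | github.com/szmxwu/reportQC_V2 | origin/keyword_extraction.py | find_max_common_words
-- ===== SOURCE A (Python) =====
-- def find_max_common_words(list_a, list_c):
--     # 初始化最大公共单词计数和对应的子列表集合
--     max_common_count = 0
--     best_lists = []
--
--     for sublist in list_c:
--         # 计算当前子列表与list_a的重复单词数量
--         common_count = len(set(sublist['partlist']) & set(list_a['partlist']))
--
--         # 如果找到新的最大值，重置best_lists并添加当前子列表
--         if common_count > max_common_count:
--             max_common_count = common_count
--             best_lists = [sublist]
--
--         # 如果当前计数等于最大值，则将当前子列表添加到结果中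
--         elif common_count == max_common_count:
--             best_lists.append(sublist)
--
--     return best_lists
-- ===== SOURCE B (Python) =====
-- def find_max_common_words(list_a, list_c):
--     # Two-pass decomposition: compute all overlap counts once, then filter by their max.
--     if not list_c:
--         return []
--     a_words = set(list_a['partlist'])
--     counts = [len(set(sub['partlist']) & a_words) for sub in list_c]
--     m = max(counts)
--     return [sub for sub, c in zip(list_c, counts) if c == m]
-- ===== Notes on version B (the rewrite author's own statement) =====
-- stated objective: simpler
-- what changed: A's single-pass running-max with reset/append of best_lists is replaced by a two-pass compute-all-counts-then-filter-by-max decomposition (set(list_a['partlist']) computed once instead of per sublist).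
import Mathlib
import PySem

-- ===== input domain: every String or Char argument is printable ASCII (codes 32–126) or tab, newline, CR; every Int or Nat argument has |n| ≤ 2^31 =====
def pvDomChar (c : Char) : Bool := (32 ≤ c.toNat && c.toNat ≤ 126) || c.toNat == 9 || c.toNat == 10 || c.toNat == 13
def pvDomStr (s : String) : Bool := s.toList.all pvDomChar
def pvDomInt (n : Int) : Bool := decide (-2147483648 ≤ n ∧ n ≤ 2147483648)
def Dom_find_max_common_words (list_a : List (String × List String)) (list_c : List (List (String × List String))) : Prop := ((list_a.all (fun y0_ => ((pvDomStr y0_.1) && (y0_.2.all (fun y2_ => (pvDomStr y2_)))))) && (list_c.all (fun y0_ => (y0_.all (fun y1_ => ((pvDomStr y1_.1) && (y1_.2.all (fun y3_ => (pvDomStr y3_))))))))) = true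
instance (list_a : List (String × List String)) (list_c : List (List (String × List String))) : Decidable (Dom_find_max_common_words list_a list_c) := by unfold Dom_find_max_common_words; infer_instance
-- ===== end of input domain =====

-- B replaces A's single-pass running-max-with-reset by a two-pass compute-counts-then-filter decomposition (simpler; return value only, no mutation).


-- ===== PORT A =====
def find_max_common_words (list_a : List (String × List String)) (list_c : List (List (String × List String))) : List (List (String × List String)) :=
  -- max_common_count = 0; best_lists = []; for sublist in list_c: …
  (list_c.foldl
    (fun st sublist =>
      let common_count : Int :=
        (PySem.Set.inter (PySem.Set.ofList ((PySem.Dict.mk sublist).getD "partlist" []))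
                         (PySem.Set.ofList ((PySem.Dict.mk list_a).getD "partlist" []))).len
      if common_count > st.1 then (common_count, [sublist])
      else if common_count = st.1 then (st.1, st.2 ++ [sublist])
      else st)
    ((0 : Int), ([] : List (List (String × List String))))).2

-- ===== PORT B =====
def find_max_common_words_alt (list_a : List (String × List String)) (list_c : List (List (String × List String))) : List (List (String × List String)) :=
  if list_c = [] then []
  else
    let a_words := PySem.Set.ofList ((PySem.Dict.mk list_a).getD "partlist" [])
    let counts := list_c.map (fun sub =>
      (PySem.Set.inter (PySem.Set.ofList ((PySem.Dict.mk sub).getD "partlist" [])) a_words).len)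
    let m := (PySem.List.max? counts (fun y => y)).getD 0   -- max(counts), counts nonempty here
    ((list_c.zip counts).filter (fun p => p.2 == m)).map Prod.fst

-- ===== PRECONDITION & SPEC =====
-- Pre_ excludes exactly the inputs where the Python A raises KeyError: a sublist of list_c
-- without the 'partlist' key, or (with list_c nonempty) list_a without it.
def Pre_find_max_common_words (list_a : List (String × List String)) (list_c : List (List (String × List String))) : Prop :=
  (list_c = [] ∨ (PySem.Dict.mk list_a).contains "partlist" = true) ∧
  list_c.all (fun sub => (PySem.Dict.mk sub).contains "partlist") = true
instance (list_a : List (String × List String)) (list_c : List (List (String × List String))) : Decidable (Pre_find_max_common_words list_a list_c) := by unfold Pre_find_max_common_words; infer_instance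
def pvWitness_find_max_common_words : (List (String × List String)) × (List (List (String × List String))) :=
  ([("partlist", ["a", "b"])], [[("partlist", ["b"])], [("partlist", ["c"])]])
def Spec_find_max_common_words (list_a : List (String × List String)) (list_c : List (List (String × List String))) (out : List (List (String × List String))) : Prop := out = find_max_common_words_alt list_a list_c
instance (list_a : List (String × List String)) (list_c : List (List (String × List String))) (out : List (List (String × List String))) : Decidable (Spec_find_max_common_words list_a list_c out) := by unfold Spec_find_max_common_words; infer_instance

-- ===== CLAIM (what is proved, stated in full; the proofs are below) =====
def Claim_equal_find_max_common_words : Prop := ∀ (list_a : List (String × List String)) (list_c : List (List (String × List String))), Dom_find_max_common_words list_a list_c → Pre_find_max_common_words list_a list_c → Spec_find_max_common_words list_a list_c (find_max_common_words list_a list_c)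

-- ===== LEMMAS AND PROOFS =====

-- the common-word count both ports compute for one sublist
def pvCnt (list_a : List (String × List String)) (sub : List (String × List String)) : Int :=
  (PySem.Set.inter (PySem.Set.ofList ((PySem.Dict.mk sub).getD "partlist" []))
                   (PySem.Set.ofList ((PySem.Dict.mk list_a).getD "partlist" []))).len

lemma pvCnt_nonneg (list_a sub : List (String × List String)) : 0 ≤ pvCnt list_a sub :=
  Int.natCast_nonneg _

lemma le_foldl_max_init (l : List Int) (b : Int) : b ≤ l.foldl max b := by
  induction l generalizing b with
  | nil => simp
  | cons a t ih => exact le_trans (le_max_left b a) (ih (max b a))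

-- A's running-max loop from any state equals "filter by the final max"
lemma fold_max_filter {α : Type} (f : α → Int) (l : List α) (m : Int) (bs : List α) :
    (l.foldl
      (fun st a =>
        if f a > st.1 then (f a, [a])
        else if f a = st.1 then (st.1, st.2 ++ [a])
        else st)
      (m, bs))
    = ((l.map f).foldl max m,
       (if (l.map f).foldl max m = m then bs else []) ++ l.filter (fun a => f a == (l.map f).foldl max m)) := by
  induction l generalizing m bs with
  | nil => simp
  | cons a t ih =>
    simp only [List.foldl_cons, List.map_cons, List.filter_cons]
    by_cases h1 : f a > m
    · rw [if_pos h1, ih]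
      have hm : max m (f a) = f a := by omega
      have hle : f a ≤ (t.map f).foldl max (f a) := le_foldl_max_init _ _
      simp only [hm]
      have hne : (t.map f).foldl max (f a) ≠ m := by omega
      rw [if_neg hne]
      by_cases h2 : (t.map f).foldl max (f a) = f a
      · rw [if_pos h2]
        have : (f a == (t.map f).foldl max (f a)) = true := by simp [h2]
        simp [this]
      · rw [if_neg h2]
        have : (f a == (t.map f).foldl max (f a)) = false := by
          simp; omega
        simp [this]
    · by_cases h2 : f a = m
      · rw [if_neg h1, if_pos h2, ih]
        have hm : max m (f a) = m := by omega
        simp only [hm]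
        by_cases h3 : (t.map f).foldl max m = m
        · rw [if_pos h3, if_pos h3]
          have : (f a == (t.map f).foldl max m) = true := by simp [h2, h3]
          simp [this]
        · rw [if_neg h3, if_neg h3]
          have : (f a == (t.map f).foldl max m) = false := by
            simp; omega
          simp [this]
      · rw [if_neg h1, if_neg h2, ih]
        have hm : max m (f a) = m := by omega
        simp only [hm]
        have hle : m ≤ (t.map f).foldl max m := le_foldl_max_init _ _
        have : (f a == (t.map f).foldl max m) = false := by
          simp; omega
        simp [this]

-- B's zip-then-project filter equals filtering the list directly
lemma zip_map_filter {α : Type} (f : α → Int) (m : Int) (l : List α) :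
    (((l.zip (l.map f)).filter (fun p => p.2 == m)).map Prod.fst) = l.filter (fun a => f a == m) := by
  induction l with
  | nil => simp
  | cons a t ih =>
    simp only [List.map_cons, List.zip_cons_cons, List.filter_cons]
    by_cases h : (f a == m) = true
    · simp [h, ih]
    · simp only [Bool.not_eq_true] at h
      simp [h, ih]

-- ===== VERDICT (by name: the statement is the Claim_ definition above) =====
theorem find_max_common_words_spec : Claim_equal_find_max_common_words := by
  intro list_a list_c _hdom _hpre
  unfold Spec_find_max_common_words
  show (list_c.foldl
      (fun st a =>
        if pvCnt list_a a > st.1 then (pvCnt list_a a, [a])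
        else if pvCnt list_a a = st.1 then (st.1, st.2 ++ [a])
        else st)
      ((0 : Int), [])).2
    = find_max_common_words_alt list_a list_c
  rw [fold_max_filter (pvCnt list_a) list_c 0 []]
  cases list_c with
  | nil => simp [find_max_common_words_alt]
  | cons a t =>
    show (if _ = (0:Int) then ([] : List (List (String × List String))) else []) ++ _ = _
    rw [ite_self]
    unfold find_max_common_words_alt
    rw [if_neg (by simp : ¬(a :: t = []))]
    show List.nil ++ _ = (((a :: t).zip ((a :: t).map (pvCnt list_a))).filter
        (fun p => p.2 == (PySem.List.max? ((a :: t).map (pvCnt list_a)) (fun y => y)).getD 0)).map Prod.fst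
    rw [List.nil_append, zip_map_filter]
    have hmax : (PySem.List.max? ((a :: t).map (pvCnt list_a)) (fun y => y)).getD 0
        = ((a :: t).map (pvCnt list_a)).foldl max 0 := by
      rw [List.map_cons, PySem.List.max?_id_cons]
      simp only [Option.getD_some, List.foldl_cons]
      have h0 : max 0 (pvCnt list_a a) = pvCnt list_a a :=
        max_eq_right (pvCnt_nonneg list_a a)
      rw [h0]
    rw [hmax]
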